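-- pv_equiv track=rewrite | github.com/idfuturestars/idfspathwayiq | backend/idfs_content_manager.py | extract_learning_objectives
-- ===== SOURCE A (Python) =====
-- from typing import Dict, List, Optional, Any
--
-- def extract_learning_objectives(content: str) -> List[str]:
--     """Extract learning objectives from content"""
--     objectives = []
--
--     # Look for common patterns
--     patterns = [
--         "Learn about", "Understand", "Discover", "Explore", "Develop",
--         "Benefits of", "Advantages of", "Why", "How to", "What is"
--     ]
--
--     sentences = content.split('.')
--     for sentence in sentences:
--         for pattern in patterns:
--             if pattern.lower() in sentence.lower() and len(sentence.strip()) > 10: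
--                 objectives.append(sentence.strip())
--                 break
--
--     return objectives[:5]  # Limit to 5 objectives
-- ===== SOURCE B (Python) =====
-- def extract_learning_objectives(content: str):
--     """Extract learning objectives from content"""
--     patterns = [
--         "learn about", "understand", "discover", "explore", "develop",
--         "benefits of", "advantages of", "why", "how to", "what is"
--     ]
--
--     def flush(objectives, buf):
--         # finalize one sentence held in the character buffer
--         s = ''.join(buf)
--         stripped = s.strip()
--         if len(stripped) > 10:
--             low = s.lower()
--             if any(p in low for p in patterns):
--                 objectives.append(stripped)
--         return objectives
--
--     # single character-level pass: no split(), explicit sentence buffer,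
--     # early exit as soon as 5 objectives are collected
--     objectives = []
--     buf = []
--     for ch in content:
--         if ch == '.':
--             flush(objectives, buf)
--             if len(objectives) == 5:
--                 return objectives
--             buf = []
--         else:
--             buf.append(ch)
--     flush(objectives, buf)
--     return objectives
-- ===== Notes on version B (the rewrite author's own statement) =====
-- stated objective: alternative
-- what changed: B replaces split-then-nested-pattern-loop with a single character-level pass: it maintains an explicit sentence buffer, flushes it at each period (and once at the end) through one pre-lowered any() substring test, and returns early as soon as 5 objectives are collected instead of collecting everything and slicing the first five.
import Mathlib
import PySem

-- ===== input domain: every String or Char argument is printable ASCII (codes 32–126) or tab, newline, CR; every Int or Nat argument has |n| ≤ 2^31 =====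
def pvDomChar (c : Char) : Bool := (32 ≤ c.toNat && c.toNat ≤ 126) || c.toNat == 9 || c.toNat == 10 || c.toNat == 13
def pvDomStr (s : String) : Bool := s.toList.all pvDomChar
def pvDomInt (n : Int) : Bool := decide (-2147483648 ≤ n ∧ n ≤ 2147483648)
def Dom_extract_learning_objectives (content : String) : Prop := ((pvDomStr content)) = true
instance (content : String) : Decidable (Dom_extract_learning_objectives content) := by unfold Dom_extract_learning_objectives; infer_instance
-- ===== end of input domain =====

-- B (alternative): a single character-level pass with an explicit sentence buffer — no split(),
-- the inner pattern loop replaced by one any() over pre-lowered patterns, early exit at 5;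
-- same return value as A.


-- ===== PORT A =====
-- A: split on '.', then for each sentence an inner loop over the ten patterns with break,
-- collect all matches, slice [:5].
def pvPatternsA : List String :=
  ["Learn about", "Understand", "Discover", "Explore", "Develop",
   "Benefits of", "Advantages of", "Why", "How to", "What is"]

-- the inner 'for pattern in patterns: if …: append; break' as a Bool scan
def pvInnerA (sentence : String) : List String → Bool
  | [] => false
  | p :: rest =>
    if PySem.Str.isIn (PySem.Str.lower p) (PySem.Str.lower sentence)
        && decide ((PySem.Str.len (PySem.Str.strip sentence) : Int) > 10)
    then true
    else pvInnerA sentence rest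

def extract_learning_objectives (content : String) : List String :=
  -- sep "." is nonempty, so Python's split never raises: split? is some
  let sentences := (PySem.Str.split? content ".").getD []
  let objectives := sentences.foldl
    (fun obj s => if pvInnerA s pvPatternsA then obj ++ [PySem.Str.strip s] else obj) []
  PySem.List.slice objectives none (some 5)

-- ===== PORT B =====
-- B: no split; one pass over the characters with an explicit buffer, flushing at each '.',
-- with a final flush for the trailing fragment and an early return at 5 objectives.
def pvPatternsB : List (List Char) :=
  ["learn about".toList, "understand".toList, "discover".toList, "explore".toList,
   "develop".toList, "benefits of".toList, "advantages of".toList, "why".toList,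
   "how to".toList, "what is".toList]

-- 'flush': ''.join(buf), the length guard, the any() test, the conditional append
def pvFlushB (objectives : List String) (buf : List Char) : List String :=
  let stripped := PySem.Chars.strip buf
  if (PySem.Chars.len stripped : Int) > 10 then
    if pvPatternsB.any (fun p => PySem.Chars.isIn p (PySem.Chars.lower buf)) then
      objectives ++ [String.ofList stripped]
    else objectives
  else objectives

-- the 'for ch in content' loop
def pvScanB (objectives : List String) (buf : List Char) : List Char → List String
  | [] => pvFlushB objectives buf
  | c :: rest =>
    if c = '.' then
      let obj' := pvFlushB objectives buf
      if obj'.length == 5 then obj' else pvScanB obj' [] rest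
    else pvScanB objectives (buf ++ [c]) rest

def extract_learning_objectives_alt (content : String) : List String :=
  pvScanB [] [] content.toList

-- ===== PRECONDITION & SPEC =====
def Spec_extract_learning_objectives (content : String) (out : List String) : Prop := out = extract_learning_objectives_alt content
instance (content : String) (out : List String) : Decidable (Spec_extract_learning_objectives content out) := by unfold Spec_extract_learning_objectives; infer_instance

-- ===== CLAIM =====
def Claim_equal_extract_learning_objectives : Prop := ∀ (content : String), Dom_extract_learning_objectives content → Spec_extract_learning_objectives content (extract_learning_objectives content)

-- ===== LEMMAS AND PROOFS =====

-- prepend to the head sentence (helper to characterise splitOn '.')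
def pvConsHead (x : List Char) : List (List Char) → List (List Char)
  | [] => [x]
  | h :: t => (x ++ h) :: t

-- structural recursion computing s.split('.') at char level
def pvSplitDot : List Char → List (List Char)
  | [] => [[]]
  | c :: rest => if c = '.' then [] :: pvSplitDot rest else pvConsHead [c] (pvSplitDot rest)

-- the shared per-sentence condition, at char level
def pvCondC (l : List Char) : Bool :=
  (decide ((PySem.Chars.len (PySem.Chars.strip l) : Int) > 10))
    && pvPatternsB.any (fun p => PySem.Chars.isIn p (PySem.Chars.lower l))

theorem pvSplitDot_ne_nil (l : List Char) : pvSplitDot l ≠ [] := by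
  match l with
  | [] => simp [pvSplitDot]
  | c :: rest =>
    simp only [pvSplitDot]
    split
    · simp
    · match h : pvSplitDot rest with
      | [] => simp [pvConsHead]
      | x :: t => simp [pvConsHead]

theorem pvConsHead_nil (xs : List (List Char)) (h : xs ≠ []) : pvConsHead [] xs = xs := by
  match xs with
  | [] => exact absurd rfl h
  | x :: t => simp [pvConsHead]

theorem pvConsHead_consHead (a b : List Char) (xs : List (List Char)) :
    pvConsHead a (pvConsHead b xs) = pvConsHead (a ++ b) xs := by
  match xs with
  | [] => simp [pvConsHead]
  | x :: t => simp [pvConsHead]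

theorem pvGo_spec : ∀ (fuel : Nat) (l cur : List Char) (acc : List (List Char)),
    l.length < fuel →
    PySem.Chars.splitOn.go ['.'] fuel l cur acc
      = acc.reverse ++ pvConsHead cur.reverse (pvSplitDot l) := by
  intro fuel
  induction fuel with
  | zero => intro l cur acc h; omega
  | succ n ih =>
    intro l cur acc h
    match l with
    | [] => simp [PySem.Chars.splitOn.go, pvSplitDot, pvConsHead]
    | c :: rest =>
      rw [PySem.Chars.splitOn.go]
      by_cases hc : c = '.'
      · subst hc
        simp only [List.isPrefixOf, show (('.' : Char) == '.') = true from rfl, Bool.true_and,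
          if_true, List.length_cons, List.drop_succ_cons, List.length_nil, List.drop_zero]
        rw [ih rest [] _ (by simpa using Nat.lt_of_succ_lt_succ h)]
        simp only [pvSplitDot, List.reverse_cons, List.reverse_nil]
        rw [pvConsHead_nil _ (pvSplitDot_ne_nil rest)]
        simp [pvConsHead]
      · have hpre : List.isPrefixOf ['.'] (c :: rest) = false := by
          simp only [List.isPrefixOf, Bool.and_true]
          exact decide_eq_false (fun h' => hc h'.symm)
        rw [hpre]
        simp only [Bool.false_eq_true, if_false]
        rw [ih rest (c :: cur) acc (by simpa using Nat.lt_of_succ_lt_succ h)]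
        simp only [pvSplitDot, if_neg hc, List.reverse_cons]
        rw [pvConsHead_consHead]

theorem pvSplitOn_eq (s : List Char) : PySem.Chars.splitOn s ['.'] = pvSplitDot s := by
  unfold PySem.Chars.splitOn
  rw [pvGo_spec (s.length + 1) s [] [] (Nat.lt_succ_self _)]
  simp only [List.reverse_nil, List.nil_append]
  exact pvConsHead_nil _ (pvSplitDot_ne_nil s)

-- A's inner loop, for a general pattern list
theorem pvInnerA_gen (s : String) (ps : List String) :
    pvInnerA s ps
      = (ps.any (fun p => PySem.Str.isIn (PySem.Str.lower p) (PySem.Str.lower s))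
          && decide ((PySem.Str.len (PySem.Str.strip s) : Int) > 10)) := by
  induction ps with
  | nil => simp [pvInnerA]
  | cons p rest ih =>
    simp only [pvInnerA, List.any_cons, ih]
    cases PySem.Str.isIn (PySem.Str.lower p) (PySem.Str.lower s) <;>
      cases decide ((PySem.Str.len (PySem.Str.strip s) : Int) > 10) <;> simp

theorem pvLowered :
    pvPatternsA.map (fun p => PySem.Chars.lower p.toList) = pvPatternsB := by decide

-- A's per-sentence test equals the char-level condition
theorem pvInnerA_eq (s : String) : pvInnerA s pvPatternsA = pvCondC s.toList := by
  rw [pvInnerA_gen, pvCondC, Bool.and_comm]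
  have hlen : decide ((PySem.Str.len (PySem.Str.strip s) : Int) > 10)
      = decide ((PySem.Chars.len (PySem.Chars.strip s.toList) : Int) > 10) := by
    simp [PySem.Str.len_eq, PySem.Str.strip, PySem.Chars.len_eq]
  have hany : pvPatternsA.any (fun p => PySem.Str.isIn (PySem.Str.lower p) (PySem.Str.lower s))
      = pvPatternsB.any (fun p => PySem.Chars.isIn p (PySem.Chars.lower s.toList)) := by
    rw [← pvLowered, List.any_map]
    simp only [PySem.Str.isIn, PySem.Str.lower, String.toList_ofList, Function.comp_def]
  rw [hlen, hany]

-- B's scan computes 'take 5 of the stripped matching sentences', sentence list seeded by buf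
theorem pvScanB_eq (cs : List Char) : ∀ (obj : List String) (buf : List Char),
    obj.length < 5 →
    pvScanB obj buf cs
      = (obj ++ ((pvConsHead buf (pvSplitDot cs)).filter pvCondC).map
          (fun l => String.ofList (PySem.Chars.strip l))).take 5 := by
  induction cs with
  | nil =>
    intro obj buf h
    simp only [pvScanB, pvSplitDot, pvConsHead, List.append_nil, pvFlushB]
    by_cases h1 : (PySem.Chars.len (PySem.Chars.strip buf) : Int) > 10
    · by_cases h2 : pvPatternsB.any (fun p => PySem.Chars.isIn p (PySem.Chars.lower buf)) = true
      · rw [if_pos h1, if_pos h2]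
        have : pvCondC buf = true := by
          simp only [pvCondC, h2, Bool.and_true]; exact decide_eq_true h1
        rw [List.filter_cons_of_pos this]
        simp only [List.filter_nil, List.map_cons, List.map_nil]
        rw [List.take_of_length_le (by simp; omega)]
      · rw [if_pos h1, if_neg h2]
        have : pvCondC buf = false := by
          simp only [pvCondC, Bool.and_eq_false_iff]; right; simpa using h2
        rw [List.filter_cons_of_neg (by simp [this])]
        simp only [List.filter_nil, List.map_nil, List.append_nil]
        rw [List.take_of_length_le (Nat.le_of_lt h)]
    · rw [if_neg h1]
      have : pvCondC buf = false := by
        simp only [pvCondC, Bool.and_eq_false_iff]; left; simpa using h1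
      rw [List.filter_cons_of_neg (by simp [this])]
      simp only [List.filter_nil, List.map_nil, List.append_nil]
      rw [List.take_of_length_le (Nat.le_of_lt h)]
  | cons c rest ih =>
    intro obj buf h
    by_cases hc : c = '.'
    · subst hc
      simp only [pvScanB, pvSplitDot, reduceIte]
      rw [show pvConsHead buf ([] :: pvSplitDot rest) = buf :: pvSplitDot rest from by
        simp [pvConsHead]]
      simp only [pvFlushB]
      by_cases h1 : (PySem.Chars.len (PySem.Chars.strip buf) : Int) > 10
      · by_cases h2 : pvPatternsB.any (fun p => PySem.Chars.isIn p (PySem.Chars.lower buf)) = true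
        · rw [if_pos h1, if_pos h2]
          have hcond : pvCondC buf = true := by
            simp only [pvCondC, h2, Bool.and_true]; exact decide_eq_true h1
          rw [List.filter_cons_of_pos hcond]
          by_cases h5 : (obj ++ [String.ofList (PySem.Chars.strip buf)]).length = 5
          · rw [show ((obj ++ [String.ofList (PySem.Chars.strip buf)]).length == 5) = true from by
              simp [h5]]
            simp only [if_true, List.map_cons]
            rw [show obj ++ String.ofList (PySem.Chars.strip buf)
                  :: ((pvSplitDot rest).filter pvCondC).map (fun l => String.ofList (PySem.Chars.strip l))
                = (obj ++ [String.ofList (PySem.Chars.strip buf)])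
                  ++ ((pvSplitDot rest).filter pvCondC).map (fun l => String.ofList (PySem.Chars.strip l))
              from by simp]
            rw [List.take_append_of_le_length (le_of_eq h5.symm),
              List.take_of_length_le (le_of_eq h5)]
          · rw [show ((obj ++ [String.ofList (PySem.Chars.strip buf)]).length == 5) = false from by
              simpa using h5]
            simp only [Bool.false_eq_true, if_false]
            have hlen : (obj ++ [String.ofList (PySem.Chars.strip buf)]).length < 5 := by
              simp only [List.length_append, List.length_singleton] at h5 ⊢; omega
            rw [ih _ [] hlen, pvConsHead_nil _ (pvSplitDot_ne_nil rest)]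
            simp
        · rw [if_pos h1, if_neg h2]
          have hcond : pvCondC buf = false := by
            simp only [pvCondC, Bool.and_eq_false_iff]; right; simpa using h2
          rw [List.filter_cons_of_neg (by simp [hcond]),
            show (obj.length == 5) = false from by simpa using Nat.ne_of_lt h]
          simp only [Bool.false_eq_true, if_false]
          rw [ih obj [] h, pvConsHead_nil _ (pvSplitDot_ne_nil rest)]
      · rw [if_neg h1]
        have hcond : pvCondC buf = false := by
          simp only [pvCondC, Bool.and_eq_false_iff]; left; simpa using h1
        rw [List.filter_cons_of_neg (by simp [hcond]),
          show (obj.length == 5) = false from by simpa using Nat.ne_of_lt h]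
        simp only [Bool.false_eq_true, if_false]
        rw [ih obj [] h, pvConsHead_nil _ (pvSplitDot_ne_nil rest)]
    · simp only [pvScanB, pvSplitDot, if_neg hc]
      rw [ih obj (buf ++ [c]) h, pvConsHead_consHead]

-- ===== VERDICT =====
theorem extract_learning_objectives_spec : Claim_equal_extract_learning_objectives := by
  intro content _
  unfold Spec_extract_learning_objectives extract_learning_objectives extract_learning_objectives_alt
  have hsplit : (PySem.Str.split? content ".").getD []
      = (pvSplitDot content.toList).map String.ofList := by
    simp only [PySem.Str.split?, PySem.Chars.split?]
    rw [show (".".toList : List Char) = ['.'] from rfl]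
    simp [pvSplitOn_eq]
  have hcong :
      ((PySem.Str.split? content ".").getD []).foldl
        (fun obj s => if pvInnerA s pvPatternsA then obj ++ [PySem.Str.strip s] else obj) []
      = ((PySem.Str.split? content ".").getD []).foldl
        (fun obj s => if pvCondC s.toList then obj ++ [PySem.Str.strip s] else obj) [] := by
    apply PySem.List.foldl_congr_mem
    intro acc x _
    rw [pvInnerA_eq]
  simp only [hcong, PySem.List.foldl_append_if, List.nil_append]
  rw [PySem.List.slice_to _ (by norm_num), hsplit]
  rw [pvScanB_eq content.toList [] [] (by norm_num),
    pvConsHead_nil _ (pvSplitDot_ne_nil content.toList), List.nil_append]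
  rw [List.filter_map, List.map_map]
  have : (5 : Int).toNat = 5 := rfl
  rw [this]
  congr 1
  · congr 1
    · funext s; simp [PySem.Str.strip, Function.comp]
    · congr 1; funext l; simp [Function.comp]
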